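-- pv_equiv track=rewrite | github.com/akma327/GPCR-WaterDynamics | src/analysis/competing-network-analysis/utils.py | calcLabelIndexGroups
-- ===== SOURCE A (Python) =====
-- def orderGpcrdb(gpcrdb1, gpcrdb2):
-- 	### Handle Ligand Cases
-- 	if("LIG" in gpcrdb1 and "LIG" not in gpcrdb2): return (gpcrdb1, gpcrdb2)
-- 	elif("LIG" not in gpcrdb1 and "LIG" in gpcrdb2): return (gpcrdb2, gpcrdb1)
-- 	elif("LIG" in gpcrdb1 and "LIG" in gpcrdb2): return (gpcrdb1, gpcrdb2)
--
-- 	### Normal cases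
-- 	tm1, resid1 = map(int, gpcrdb1.split("x"))
-- 	tm2, resid2 = map(int, gpcrdb2.split("x"))
-- 	if(tm1 < tm2): return (gpcrdb1, gpcrdb2)
-- 	elif(tm2 < tm1): return (gpcrdb2, gpcrdb1)
-- 	else:
-- 		if(resid1 < resid2): return (gpcrdb1, gpcrdb2)
-- 		else: return (gpcrdb2, gpcrdb1)
--
-- def calcLabelIndexGroups(rowLabels, rawBinaryMatrix):
-- 	"""
-- 		Group indices for rows that share the same gpcrdb pair
-- 	"""
--
-- 	label_index_groups = {}
-- 	for index, label in enumerate(rowLabels):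
-- 		if(label == None): continue
-- 		interaction_type, atom1, atom2, gpcrdb1, gpcrdb2 = label
-- 		gpcrdb_pair_key = orderGpcrdb(gpcrdb1, gpcrdb2)
-- 		if(gpcrdb_pair_key not in label_index_groups):
-- 			label_index_groups[gpcrdb_pair_key] = [index]
-- 		else:
-- 			label_index_groups[gpcrdb_pair_key].append(index)
-- 	return label_index_groups
-- ===== SOURCE B (Python) =====
-- def _pairKey(gpcrdb1, gpcrdb2):
-- 	# canonical ordered pair, written as a comparison on parsed (tm, resid) tuples
-- 	if "LIG" in gpcrdb1 or "LIG" in gpcrdb2: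
-- 		return (gpcrdb2, gpcrdb1) if ("LIG" in gpcrdb2 and "LIG" not in gpcrdb1) else (gpcrdb1, gpcrdb2)
-- 	tm1, resid1 = map(int, gpcrdb1.split("x"))
-- 	tm2, resid2 = map(int, gpcrdb2.split("x"))
-- 	return (gpcrdb1, gpcrdb2) if (tm1, resid1) < (tm2, resid2) else (gpcrdb2, gpcrdb1)
--
-- def calcLabelIndexGroups(rowLabels, rawBinaryMatrix):
-- 	pairs = [(_pairKey(label[3], label[4]), index)
-- 	         for index, label in enumerate(rowLabels) if label is not None]
-- 	return {key: [i for k, i in pairs if k == key]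
-- 	        for key in dict.fromkeys(k for k, _ in pairs)}
-- ===== Notes on version B (the rewrite author's own statement) =====
-- stated objective: alternative
-- what changed: B first materialises the full (canonical-key, index) pair list, then builds the result as a dict comprehension over the first-occurrence-deduplicated keys, gathering each group by filtering the pair list, instead of A's incremental hash-bucket insert/append loop; the key canonicaliser is rewritten as a single tuple comparison on (tm,resid) instead of A's five-way branch chain.
import Mathlib
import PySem

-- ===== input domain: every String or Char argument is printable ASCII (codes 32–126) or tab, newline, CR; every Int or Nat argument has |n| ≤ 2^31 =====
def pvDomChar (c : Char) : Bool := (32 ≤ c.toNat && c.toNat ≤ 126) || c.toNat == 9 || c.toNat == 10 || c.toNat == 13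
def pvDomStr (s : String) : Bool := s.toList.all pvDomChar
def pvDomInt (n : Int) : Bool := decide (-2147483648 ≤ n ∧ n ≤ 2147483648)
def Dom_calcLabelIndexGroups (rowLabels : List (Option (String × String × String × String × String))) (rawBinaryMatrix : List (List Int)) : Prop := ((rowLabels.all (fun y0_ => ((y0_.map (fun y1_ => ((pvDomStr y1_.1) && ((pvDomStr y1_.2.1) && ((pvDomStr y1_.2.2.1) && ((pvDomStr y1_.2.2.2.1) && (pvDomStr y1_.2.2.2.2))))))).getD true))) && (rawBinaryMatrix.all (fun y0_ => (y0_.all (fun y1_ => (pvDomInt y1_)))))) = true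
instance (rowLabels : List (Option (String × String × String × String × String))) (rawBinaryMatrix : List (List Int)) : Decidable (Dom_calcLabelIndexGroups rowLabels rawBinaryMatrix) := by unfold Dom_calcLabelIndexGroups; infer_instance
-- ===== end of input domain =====

-- B replaces A's incremental dict-bucketing loop by a pair-list + dedup-then-gather comprehension
-- (objective: alternative decomposition, not faster); the return value is a dict, compared as such.

-- ===== PORT A =====
-- orderGpcrdb: none exactly where the Python raises ValueError (bad gpcrdb string in the non-LIG branch)
def orderGpcrdb (g1 g2 : String) : Option (String × String) :=
  if PySem.Str.isIn "LIG" g1 && !(PySem.Str.isIn "LIG" g2) then some (g1, g2)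
  else if !(PySem.Str.isIn "LIG" g1) && PySem.Str.isIn "LIG" g2 then some (g2, g1)
  else if PySem.Str.isIn "LIG" g1 && PySem.Str.isIn "LIG" g2 then some (g1, g2)
  else
    match PySem.Str.split? g1 "x" with
    | some [s1, s2] =>
      match PySem.Int.ofStr? s1, PySem.Int.ofStr? s2 with
      | some tm1, some resid1 =>
        match PySem.Str.split? g2 "x" with
        | some [s3, s4] =>
          match PySem.Int.ofStr? s3, PySem.Int.ofStr? s4 with
          | some tm2, some resid2 =>
            if tm1 < tm2 then some (g1, g2)
            else if tm2 < tm1 then some (g2, g1)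
            else if resid1 < resid2 then some (g1, g2)
            else some (g2, g1)
          | _, _ => none
        | _ => none
      | _, _ => none
    | _ => none

-- the loop body; the Option state is none once the Python has raised
def calcStepA (od : Option (PySem.Dict (String × String) (List Int)))
    (p : Int × Option (String × String × String × String × String)) :
    Option (PySem.Dict (String × String) (List Int)) :=
  match od with
  | none => none
  | some d =>
    match p.2 with
    | none => some d
    | some (_, _, _, g1, g2) =>
      match orderGpcrdb g1 g2 with
      | none => none
      | some key =>
        some (if d.contains key then d.modify key [] (fun l => l ++ [p.1])
              else d.insert key [p.1])

def calcLabelIndexGroups (rowLabels : List (Option (String × String × String × String × String))) (rawBinaryMatrix : List (List Int)) : List (String × String × List Int) :=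
  match (PySem.List.enumerate rowLabels 0).foldl calcStepA (some PySem.Dict.empty) with
  | none => []  -- the Python raises ValueError here; excluded by Pre_
  | some d => d.items.map (fun q => (q.1.1, q.1.2, q.2))

-- ===== PORT B =====
def pairKey (g1 g2 : String) : Option (String × String) :=
  if PySem.Str.isIn "LIG" g1 || PySem.Str.isIn "LIG" g2 then
    some (if PySem.Str.isIn "LIG" g2 && !(PySem.Str.isIn "LIG" g1) then (g2, g1) else (g1, g2))
  else
    match PySem.Str.split? g1 "x", PySem.Str.split? g2 "x" with
    | some [s1, s2], some [s3, s4] =>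
      match PySem.Int.ofStr? s1, PySem.Int.ofStr? s2, PySem.Int.ofStr? s3, PySem.Int.ofStr? s4 with
      | some tm1, some r1, some tm2, some r2 =>
        some (if tm1 < tm2 ∨ (tm1 = tm2 ∧ r1 < r2) then (g1, g2) else (g2, g1))
      | _, _, _, _ => none
    | _, _ => none

-- the first comprehension: the (key, index) pair list (none once _pairKey has raised)
def collectPairs : List (Option (String × String × String × String × String)) → Int →
    Option (List ((String × String) × Int))
  | [], _ => some []
  | none :: rest, i => collectPairs rest (i + 1)
  | some (_, _, _, g1, g2) :: rest, i =>
    match pairKey g1 g2 with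
    | none => none
    | some k => (collectPairs rest (i + 1)).map (fun ps => (k, i) :: ps)

def calcLabelIndexGroups_alt (rowLabels : List (Option (String × String × String × String × String))) (rawBinaryMatrix : List (List Int)) : List (String × String × List Int) :=
  match collectPairs rowLabels 0 with
  | none => []  -- the Python raises ValueError here; excluded by Pre_
  | some pairs =>
    (PySem.List.dedup (pairs.map (fun q => q.1))).map
      (fun k => (k.1, k.2, (pairs.filter (fun q => q.1 == k)).map (fun q => q.2)))

-- ===== PRECONDITION & SPEC =====
-- a well-formed gpcrdb string of the non-ligand kind: exactly "…x…" with two int()-parseable parts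
def gpcrdbOK (g : String) : Bool :=
  match PySem.Str.split? g "x" with
  | some [s1, s2] => (PySem.Int.ofStr? s1).isSome && (PySem.Int.ofStr? s2).isSome
  | _ => false

-- Pre_ excludes exactly the inputs on which the Python A raises ValueError: a non-None label whose
-- gpcrdb pair has no "LIG" and a string that is not "<int>x<int>".
def Pre_calcLabelIndexGroups (rowLabels : List (Option (String × String × String × String × String))) (rawBinaryMatrix : List (List Int)) : Prop :=
  rowLabels.all (fun l =>
    match l with
    | none => true
    | some (_, _, _, g1, g2) =>
      PySem.Str.isIn "LIG" g1 || PySem.Str.isIn "LIG" g2 || (gpcrdbOK g1 && gpcrdbOK g2)) = true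
instance (rowLabels : List (Option (String × String × String × String × String))) (rawBinaryMatrix : List (List Int)) : Decidable (Pre_calcLabelIndexGroups rowLabels rawBinaryMatrix) := by unfold Pre_calcLabelIndexGroups; infer_instance

def pvWitness_calcLabelIndexGroups : (List (Option (String × String × String × String × String))) × List (List Int) :=
  ([some ("hbond", "N", "O", "1x50", "1x51"), none, some ("vdw", "C", "C", "LIG", "1x50")], [[1], [0], [1]])

def Spec_calcLabelIndexGroups (rowLabels : List (Option (String × String × String × String × String))) (rawBinaryMatrix : List (List Int)) (out : List (String × String × List Int)) : Prop := out = calcLabelIndexGroups_alt rowLabels rawBinaryMatrix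
instance (rowLabels : List (Option (String × String × String × String × String))) (rawBinaryMatrix : List (List Int)) (out : List (String × String × List Int)) : Decidable (Spec_calcLabelIndexGroups rowLabels rawBinaryMatrix out) := by unfold Spec_calcLabelIndexGroups; infer_instance

-- ===== CLAIM (what is proved, stated in full; the proofs are below) =====
def Claim_equal_calcLabelIndexGroups : Prop := ∀ (rowLabels : List (Option (String × String × String × String × String))) (rawBinaryMatrix : List (List Int)), Dom_calcLabelIndexGroups rowLabels rawBinaryMatrix → Pre_calcLabelIndexGroups rowLabels rawBinaryMatrix → Spec_calcLabelIndexGroups rowLabels rawBinaryMatrix (calcLabelIndexGroups rowLabels rawBinaryMatrix)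

-- ===== LEMMAS AND PROOFS =====

-- B's key function computes A's: the LIG branch chain collapses, and the tuple comparison
-- (tm1,r1) < (tm2,r2) is A's three-way branch.
theorem pairKey_eq (g1 g2 : String) : pairKey g1 g2 = orderGpcrdb g1 g2 := by
  unfold pairKey orderGpcrdb
  cases h1 : PySem.Str.isIn "LIG" g1 <;> cases h2 : PySem.Str.isIn "LIG" g2 <;> simp
  cases e1 : PySem.Str.split? g1 "x" with
  | none => rfl
  | some l1 =>
    cases e2 : PySem.Str.split? g2 "x" with
    | none =>
      match l1 with
      | [] => rfl
      | [a] => rfl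
      | a :: b :: c :: t => rfl
      | [a, b] =>
        cases ha : PySem.Int.ofStr? a <;> cases hb : PySem.Int.ofStr? b <;> simp [ha, hb]
    | some l2 =>
      match l1, l2 with
      | [], _ => rfl
      | [a], _ => rfl
      | a :: b :: c :: t, _ => rfl
      | [a, b], [] =>
        cases ha : PySem.Int.ofStr? a <;> cases hb : PySem.Int.ofStr? b <;> simp [ha, hb]
      | [a, b], [c] =>
        cases ha : PySem.Int.ofStr? a <;> cases hb : PySem.Int.ofStr? b <;> simp [ha, hb]
      | [a, b], c :: d :: e :: t =>
        cases ha : PySem.Int.ofStr? a <;> cases hb : PySem.Int.ofStr? b <;> simp [ha, hb]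
      | [a, b], [c, d] =>
        cases ha : PySem.Int.ofStr? a <;> cases hb : PySem.Int.ofStr? b <;>
          cases hc : PySem.Int.ofStr? c <;> cases hd : PySem.Int.ofStr? d <;>
          simp only [ha, hb, hc, hd] <;> try rfl
        split_ifs <;> first | rfl | omega

theorem foldl_calcStepA_none (l : List (Int × Option (String × String × String × String × String))) :
    l.foldl calcStepA none = none := by
  induction l with
  | nil => rfl
  | cons p rest ih => simpa [calcStepA] using ih

-- A's fold factors through B's pair list
theorem foldA_eq_collect (rl : List (Option (String × String × String × String × String)))
    (i : Int) (d : PySem.Dict (String × String) (List Int)) :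
    (PySem.List.enumerate rl i).foldl calcStepA (some d) =
      (collectPairs rl i).map
        (fun ps => ps.foldl
          (fun d q => if d.contains q.1 then d.modify q.1 [] (fun l => l ++ [q.2])
                      else d.insert q.1 [q.2]) d) := by
  induction rl generalizing i d with
  | nil => rfl
  | cons l rest ih =>
    rw [PySem.List.enumerate_cons]
    cases l with
    | none => simp [List.foldl_cons, calcStepA, collectPairs, ih]
    | some t =>
      obtain ⟨t0, t1, t2, g1, g2⟩ := t
      rw [List.foldl_cons]
      show ((PySem.List.enumerate rest (i+1)).foldl calcStepA (calcStepA (some d) (i, some (t0,t1,t2,g1,g2)))) = _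
      simp only [collectPairs, pairKey_eq]
      cases hk : orderGpcrdb g1 g2 with
      | none => simp [calcStepA, hk, foldl_calcStepA_none]
      | some k =>
        simp only [calcStepA, hk]
        rw [ih]
        cases collectPairs rest (i + 1) <;> simp

-- the insert-or-append branch is Python's d[k] = d.get(k, []) + [i] in one step
theorem stepA_eq_modify (d : PySem.Dict (String × String) (List Int))
    (k : String × String) (i : Int) :
    (if d.contains k then d.modify k [] (fun l => l ++ [i]) else d.insert k [i]) =
      d.modify k [] (fun l => l ++ [i]) := by
  split_ifs with h
  · rfl
  · show d.insert k [i] = d.insert k (d.getD k [] ++ [i])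
    rw [PySem.Dict.getD_of_not_contains d [] (by simpa using h)]; rfl

-- the grouping fold's items are exactly dedup-then-gather
theorem fold_items (ps : List ((String × String) × Int)) :
    (ps.foldl (fun d q => d.modify q.1 [] (fun l => l ++ [q.2]))
        (PySem.Dict.empty : PySem.Dict (String × String) (List Int))).items =
      (PySem.List.dedup (ps.map (fun q => q.1))).map
        (fun k => (k, (ps.filter (fun q => q.1 == k)).map (fun q => q.2))) := by
  have hnd : (ps.foldl (fun d q => d.modify q.1 [] (fun l => l ++ [q.2]))
      (PySem.Dict.empty : PySem.Dict (String × String) (List Int))).keys.Nodup :=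
    PySem.Dict.nodup_keys_foldl_modify_key ps (fun q => q.1) [] (fun d q => (fun l => l ++ [q.2])) _ (by simp)
  rw [PySem.Dict.items_eq_map_keys _ hnd []]
  have hkeys : (ps.foldl (fun d q => d.modify q.1 [] (fun l => l ++ [q.2]))
      (PySem.Dict.empty : PySem.Dict (String × String) (List Int))).keys =
      PySem.List.dedup (ps.map (fun q => q.1)) := by
    rw [PySem.Dict.keys_foldl_modify_key, PySem.List.dedup_eq_ofList]
    rfl
  rw [hkeys]
  apply List.map_congr_left
  intro k _
  rw [PySem.Dict.getD_foldl_modify_append]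
  simp

-- ===== VERDICT (by name: the statement is the Claim_ definition above) =====
theorem calcLabelIndexGroups_spec : Claim_equal_calcLabelIndexGroups := by
  intro rl m _ _
  unfold Spec_calcLabelIndexGroups calcLabelIndexGroups calcLabelIndexGroups_alt
  rw [foldA_eq_collect]
  cases h : collectPairs rl 0 with
  | none => rfl
  | some ps =>
    simp only [Option.map_some]
    have hcongr : ps.foldl
        (fun (d : PySem.Dict (String × String) (List Int)) (q : (String × String) × Int) =>
          if d.contains q.1 then d.modify q.1 [] (fun l => l ++ [q.2]) else d.insert q.1 [q.2])
        PySem.Dict.empty =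
        ps.foldl (fun d q => d.modify q.1 [] (fun l => l ++ [q.2])) PySem.Dict.empty :=
      List.foldl_ext _ _ _ (fun d q _ => stepA_eq_modify d q.1 q.2)
    rw [hcongr, fold_items, List.map_map]
    rfl
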